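-- pv_equiv track=rewrite | github.com/tobiasgbg/code | Day 7 Part 2.py | has_bab
-- ===== SOURCE A (Python) =====
-- def has_bab ( ip_list, aba ):
--
--     insideBrackets = False
--     index = 0
--     while index < len(ip_list) :
--
--         bab = list(aba[1] + aba[0] + aba[1])
--         possible_bab = ip_list[index:index+3]
--
--         if (insideBrackets and bab == possible_bab):
--             return True
--
--         if (ip_list[index] == '['):
--             insideBrackets = True
--         elif (ip_list[index] == ']'):
--             insideBrackets = False
--
--         index += 1
--
--     return False
-- ===== SOURCE B (Python) =====
-- def has_bab(ip_list, aba):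
--     # Candidate-generation algorithm: instead of scanning every index with a
--     # stateful inside-brackets flag, extract the bracket positions, merge them
--     # into maximal inside-bracket index intervals, and test the bab window only
--     # at indices belonging to some interval.
--     if not ip_list:
--         return False
--     bab = list(aba[1] + aba[0] + aba[1])
--     n = len(ip_list)
--     brackets = [(i, c) for i, c in enumerate(ip_list) if c == '[' or c == ']']
--     intervals = []
--     while brackets:
--         (p, c), brackets = brackets[0], brackets[1:]
--         if c == '[':
--             while brackets and brackets[0][1] != ']':
--                 brackets = brackets[1:]
--             if brackets:
--                 intervals.append((p + 1, brackets[0][0]))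
--                 brackets = brackets[1:]
--             else:
--                 intervals.append((p + 1, n - 1))
--     return any(ip_list[i:i+3] == bab
--                for (s, e) in intervals
--                for i in range(s, e + 1))
-- ===== Notes on version B (the rewrite author's own statement) =====
-- stated objective: faster
-- what changed: Replaces A's single stateful index scan (an inside-brackets flag tested and updated at every index, the bab pattern rebuilt each iteration) by a candidate-generation algorithm: extract the bracket positions, merge them into maximal inside-bracket index intervals, and test the bab window only at indices belonging to some interval.
import Mathlib
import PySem

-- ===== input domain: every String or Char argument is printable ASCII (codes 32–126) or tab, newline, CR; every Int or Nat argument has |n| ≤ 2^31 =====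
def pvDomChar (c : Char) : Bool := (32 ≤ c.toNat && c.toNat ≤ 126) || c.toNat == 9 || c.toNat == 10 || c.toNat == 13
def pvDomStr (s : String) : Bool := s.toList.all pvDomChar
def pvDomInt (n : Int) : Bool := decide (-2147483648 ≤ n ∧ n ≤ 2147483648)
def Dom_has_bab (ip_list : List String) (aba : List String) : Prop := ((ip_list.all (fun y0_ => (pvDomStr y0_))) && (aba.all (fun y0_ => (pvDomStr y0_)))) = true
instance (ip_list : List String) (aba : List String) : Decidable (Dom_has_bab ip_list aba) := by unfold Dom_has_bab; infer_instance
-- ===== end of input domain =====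

-- B replaces A's stateful index scan (inside-brackets flag tested at every index, pattern
-- rebuilt each iteration) by a candidate-generation algorithm: extract the bracket positions,
-- merge them into maximal inside-bracket index intervals, and test the window only at indices
-- inside some interval (measured constant-factor speedup).

-- ===== PORT A =====

-- bab = list(aba[1] + aba[0] + aba[1]); none = IndexError (len(aba) < 2)
def babOf (aba : List String) : Option (List String) :=
  match PySem.List.pyGet? aba 1, PySem.List.pyGet? aba 0 with
  | some a1, some a0 =>
      some ((a1.toList ++ a0.toList ++ a1.toList).map (fun c => String.mk [c]))
  | _, _ => none

-- the while loop of A: state = (index, insideBrackets)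
def hasBabLoop (ip_list : List String) (aba : List String) (index : Nat) (inside : Bool) : Bool :=
  if h : index < ip_list.length then
    match babOf aba with
    | none => false   -- Python raises IndexError here (excluded by Pre_)
    | some bab =>
      let possible := PySem.List.slice ip_list (some (index : Int)) (some ((index : Int) + 3))
      if inside && bab == possible then true
      else
        let c := ip_list[index]
        hasBabLoop ip_list aba (index + 1)
          (if c == "[" then true else if c == "]" then false else inside)
  else false
termination_by ip_list.length - index

def has_bab (ip_list : List String) (aba : List String) : Bool :=
  hasBabLoop ip_list aba 0 false

-- ===== PORT B =====

-- the interval-building while loop of Source B: consumes the bracket list from the front;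
-- a '[' at p opens an interval ending at the next ']' (inclusive) or at n-1
def buildIntervals (n : Int) : List (Int × String) → List (Int × Int)
  | [] => []
  | (p, c) :: rest =>
    if c == "[" then
      match hdw : rest.dropWhile (fun q => q.2 != "]") with
      | (q, _) :: tail => (p + 1, q) :: buildIntervals n tail
      | [] => [(p + 1, n - 1)]
    else buildIntervals n rest
termination_by l => l.length
decreasing_by
  · have h1 : (rest.dropWhile (fun q => q.2 != "]")).length ≤ rest.length :=
      List.length_dropWhile_le _ rest
    rw [hdw] at h1
    simp at h1 ⊢
    omega
  · simp

def has_bab_alt (ip_list : List String) (aba : List String) : Bool :=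
  if ip_list.isEmpty then false
  else
    match babOf aba with
    | none => false   -- Python raises IndexError here (excluded by Pre_)
    | some bab =>
      let brackets := (PySem.List.enumerate ip_list 0).filter
        (fun p => p.2 == "[" || p.2 == "]")
      (buildIntervals (ip_list.length : Int) brackets).any (fun se =>
        (PySem.List.pyRange se.1 (se.2 + 1) 1).any (fun i =>
          PySem.List.slice ip_list (some i) (some (i + 3)) == bab))

-- ===== PRECONDITION & SPEC =====
-- Pre_ excludes exactly the inputs where Python A raises IndexError: nonempty ip_list with len(aba) < 2.
def Pre_has_bab (ip_list : List String) (aba : List String) : Prop :=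
  ip_list = [] ∨ 2 ≤ aba.length
instance (ip_list : List String) (aba : List String) : Decidable (Pre_has_bab ip_list aba) := by
  unfold Pre_has_bab; infer_instance

def pvWitness_has_bab : List String × List String :=
  (["[", "b", "a", "b", "]"], ["a", "b"])

def Spec_has_bab (ip_list : List String) (aba : List String) (out : Bool) : Prop := out = has_bab_alt ip_list aba
instance (ip_list : List String) (aba : List String) (out : Bool) : Decidable (Spec_has_bab ip_list aba out) := by unfold Spec_has_bab; infer_instance

-- ===== CLAIM (what is proved, stated in full; the proofs are below) =====
def Claim_equal_has_bab : Prop := ∀ (ip_list : List String) (aba : List String), Dom_has_bab ip_list aba → Pre_has_bab ip_list aba → Spec_has_bab ip_list aba (has_bab ip_list aba)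

-- ===== LEMMAS AND PROOFS =====

-- is this element a bracket?
def isBr (c : String) : Bool := c == "[" || c == "]"

-- the bracket-state update shared by both programs
def babStep (c : String) (inside : Bool) : Bool :=
  if c == "[" then true else if c == "]" then false else inside

-- the inside-flag marks of A, position by position
def marksFrom : List String → Bool → List Bool
  | [], _ => []
  | c :: cs, inside => inside :: marksFrom cs (babStep c inside)

-- 'inside' at a prefix: the last bracket seen is '[' (default ins if none)
def insideG (pre : List String) (ins : Bool) : Bool :=
  match pre.reverse.find? isBr with
  | some c => c == "["
  | none => ins

-- 'inside' read off a bracket-position list: the last entry before i is a '['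
def lob (B : List (Int × String)) (i : Int) : Bool :=
  match B.reverse.find? (fun e => decide (e.1 < i)) with
  | some e => e.2 == "["
  | none => false

-- does i belong to one of the intervals?
def covB (ivs : List (Int × Int)) (i : Int) : Bool :=
  ivs.any (fun se => decide (se.1 ≤ i) && decide (i ≤ se.2))

def bracketsOfP (l : List String) : List (Int × String) :=
  (PySem.List.enumerate l 0).filter (fun p => p.2 == "[" || p.2 == "]")

lemma marksFrom_length (l : List String) (ins : Bool) :
    (marksFrom l ins).length = l.length := by
  induction l generalizing ins with
  | nil => rfl
  | cons c cs ih => simp [marksFrom, ih]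

lemma marksFrom_getElem (l : List String) (ins : Bool) (k : Nat) (h : k < l.length) :
    (marksFrom l ins)[k]'(by rw [marksFrom_length]; exact h) = insideG (l.take k) ins := by
  induction l generalizing ins k with
  | nil => simp at h
  | cons c cs ih =>
      cases k with
      | zero => simp [marksFrom, insideG]
      | succ k =>
          have h' : k < cs.length := by simpa using h
          have := ih (babStep c ins) k h'
          simp only [marksFrom, List.getElem_cons_succ]
          rw [this]
          unfold insideG
          rw [List.take_succ_cons]
          rw [show (c :: cs.take k).reverse = (cs.take k).reverse ++ [c] by simp]
          rw [List.find?_append]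
          cases hf : (cs.take k).reverse.find? isBr with
          | some d => simp
          | none =>
              simp only [Option.or_none, Option.none_or]
              by_cases hc : isBr c = true
              · simp only [Option.none_or, List.find?, hc]
                unfold babStep
                rcases (show c = "[" ∨ c = "]" by simpa [isBr] using hc) with h1 | h1 <;> simp [h1]
              · simp [List.find?, hc]
                unfold babStep
                have : ¬ c = "[" ∧ ¬ c = "]" := by simpa [isBr] using hc
                simp [this.1, this.2]

lemma mem_bracketsOfP (l : List String) (e : Int × String) (he : e ∈ bracketsOfP l) :
    0 ≤ e.1 ∧ e.1 < l.length ∧ isBr e.2 = true := by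
  unfold bracketsOfP at he
  rw [List.mem_filter] at he
  obtain ⟨hm, hp⟩ := he
  rw [PySem.List.mem_enumerate_iff] at hm
  obtain ⟨k, hk, rfl⟩ := hm
  refine ⟨by simp, by simpa using hk, by simpa [isBr] using hp⟩

lemma pairwise_bracketsOfP (l : List String) :
    (bracketsOfP l).Pairwise (fun a b => a.1 < b.1) := by
  exact List.Pairwise.filter _ (PySem.List.pairwise_lt_enumerate l 0)

lemma find?_agree {α : Type} (p q : α → Bool) (m : List α)
    (h : ∀ a ∈ m, p a = q a) : m.find? p = m.find? q := by
  induction m with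
  | nil => rfl
  | cons a as ih =>
      simp only [List.find?]
      rw [h a (by simp)]
      cases q a
      · exact ih (fun b hb => h b (by simp [hb]))
      · rfl

lemma lob_eq_of_all_lt (B : List (Int × String)) (i j : Int)
    (hi : ∀ e ∈ B, e.1 < i) (hj : ∀ e ∈ B, e.1 < j) : lob B i = lob B j := by
  unfold lob
  have h : B.reverse.find? (fun e => decide (e.1 < i))
      = B.reverse.find? (fun e => decide (e.1 < j)) := by
    apply find?_agree
    intro a ha
    have ha' : a ∈ B := List.mem_reverse.mp ha
    simp [hi a ha', hj a ha']
  rw [h]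

lemma bracketsOfP_append (l : List String) (c : String) :
    bracketsOfP (l ++ [c]) =
      bracketsOfP l ++ (if isBr c then [((l.length : Int), c)] else []) := by
  unfold bracketsOfP
  rw [PySem.List.enumerate_append, List.filter_append]
  congr 1
  rw [PySem.List.enumerate_cons, PySem.List.enumerate_nil]
  have hpred : (fun (p : Int × String) => p.2 == "[" || p.2 == "]")
      ((0 : Int) + (l.length : Int), c) = isBr c := rfl
  cases hc : isBr c <;> simp_all [List.filter_cons]

lemma lob_bracketsOfP (l : List String) (k : Nat) (hk : k ≤ l.length) :
    lob (bracketsOfP l) (k : Int) = insideG (l.take k) false := by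
  induction l using List.reverseRecOn generalizing k with
  | nil =>
      have hk0 : k = 0 := by simpa using hk
      subst hk0; rfl
  | append_singleton l c ih =>
      rw [bracketsOfP_append]
      by_cases hkle : k ≤ l.length
      · rw [List.take_append_of_le_length hkle]
        rw [← ih k hkle]
        unfold lob
        rw [List.reverse_append, List.find?_append]
        have hnone : (if isBr c then [((l.length : Int), c)] else []).reverse.find?
            (fun e => decide (e.1 < (k : Int))) = none := by
          have hlt : decide ((l.length : Int) < (k : Int)) = false := by
            simp only [decide_eq_false_iff_not]; push_cast; omega
          split
          · rw [List.reverse_singleton, List.find?_cons_of_neg (by simp only [decide_eq_true_eq]; push_cast; omega), List.find?_nil]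
          · rfl
        rw [hnone]
        rfl
      · have hkeq : k = l.length + 1 := by simp at hk; omega
        subst hkeq
        have htake : List.take (l.length + 1) (l ++ [c]) = l ++ [c] :=
          List.take_of_length_le (by simp)
        rw [htake]
        unfold lob insideG
        rw [List.reverse_append, List.find?_append,
            show (l ++ [c]).reverse = c :: l.reverse by simp]
        push_cast
        by_cases hc : isBr c = true
        · rw [if_pos hc, List.reverse_singleton,
              List.find?_cons_of_pos (by simp only [decide_eq_true_eq]; omega),
              List.find?_cons_of_pos hc]
          rfl
        · rw [if_neg (by simpa using hc), List.reverse_nil, List.find?_nil,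
              List.find?_cons_of_neg (by simpa using hc)]
          simp only [Option.none_or]
          have h1 := lob_eq_of_all_lt (bracketsOfP l) ((l.length : Int) + 1) (l.length : Int)
            (fun e he => by have := mem_bracketsOfP l e he; omega)
            (fun e he => by have := mem_bracketsOfP l e he; omega)
          have h2 := ih l.length le_rfl
          rw [List.take_length] at h2
          unfold lob at h1 h2
          unfold insideG at h2
          rw [h1, h2]

lemma dropWhile_head_not {α : Type} (p : α → Bool) (l : List α) (x : α) (xs : List α)
    (h : l.dropWhile p = x :: xs) : p x = false := by
  induction l with
  | nil => simp at h
  | cons a as ih =>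
      rw [List.dropWhile_cons] at h
      split at h
      · exact ih h
      · cases h; simp_all

lemma lob_cons_notopen (p : Int) (c : String) (rest : List (Int × String)) (i : Int)
    (hc : (c == "[") = false) : lob ((p, c) :: rest) i = lob rest i := by
  unfold lob
  rw [List.reverse_cons, List.find?_append]
  cases hf : rest.reverse.find? (fun e => decide (e.1 < i)) with
  | some e => rfl
  | none =>
      simp only [Option.none_or]
      by_cases hp : p < i
      · rw [List.find?_cons_of_pos (by simpa using hp)]
        simp [hc]
      · rw [List.find?_cons_of_neg (by simpa using hp), List.find?_nil]

lemma buildIntervals_bounds (n : Int) (B : List (Int × String))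
    (hB : ∀ e ∈ B, 0 ≤ e.1 ∧ e.1 < n) :
    ∀ se ∈ buildIntervals n B, 1 ≤ se.1 ∧ se.2 ≤ n - 1 := by
  induction B using buildIntervals.induct with
  | case1 => intro se h; simp [buildIntervals] at h
  | case2 p c rest hc q d tail hdw ih =>
      intro se hse
      rw [buildIntervals, if_pos hc, hdw] at hse
      rcases List.mem_cons.mp hse with h | h
      · subst h
        have hq : (q, d) ∈ rest := by
          have := List.dropWhile_sublist (fun q => q.2 != "]") (l := rest)
          rw [hdw] at this
          exact this.subset (by simp)
        have h1 := hB (p, c) (by simp)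
        have h2 := hB (q, d) (by simp [hq])
        constructor <;> [skip; skip] <;> simp at h1 h2 ⊢ <;> omega
      · refine ih ?_ se h
        intro e he
        apply hB
        have hsub : tail.Sublist rest := by
          have := List.dropWhile_sublist (fun q => q.2 != "]") (l := rest)
          rw [hdw] at this
          exact (List.sublist_cons_self (q, d) tail).trans this
        exact List.mem_cons_of_mem _ (hsub.subset he)
  | case3 p c rest hc hdw =>
      intro se hse
      rw [buildIntervals, if_pos hc, hdw] at hse
      rcases List.mem_cons.mp hse with h | h
      · subst h
        have h1 := hB (p, c) (by simp)
        simp at h1 ⊢; omega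
      · simp at h
  | case4 p c rest hc ih =>
      intro se hse
      rw [buildIntervals, if_neg hc] at hse
      exact ih (fun e he => hB e (List.mem_cons_of_mem _ he)) se hse

lemma covB_buildIntervals (n : Int) (i : Int) (B : List (Int × String)) :
    B.Pairwise (fun a b => a.1 < b.1) → (∀ e ∈ B, isBr e.2 = true ∧ e.1 < n) →
    i ≤ n - 1 → covB (buildIntervals n B) i = lob B i := by
  induction B using buildIntervals.induct with
  | case1 => intro _ _ _; simp [buildIntervals, covB, lob]
  | case4 p c rest hc ih =>
      intro hpw hmem hi
      rw [buildIntervals, if_neg hc]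
      rw [lob_cons_notopen p c rest i (by simpa using hc)]
      exact ih hpw.of_cons (fun e he => hmem e (by simp [he])) hi
  | case3 p c rest hc hdw =>
      intro hpw hmem hi
      rw [buildIntervals, if_pos hc, hdw]
      have hall : ∀ e ∈ rest, (e.2 != "]") = true := by
        intro e he
        exact List.dropWhile_eq_nil_iff.mp hdw e he
      have hine : decide (i ≤ n - 1) = true := by simpa using hi
      unfold covB lob
      rw [List.any_cons, List.any_nil, Bool.or_false]
      rw [List.reverse_cons, List.find?_append]
      cases hf : rest.reverse.find? (fun e => decide (e.1 < i)) with
      | some e =>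
          have hmm : e ∈ rest := List.mem_reverse.mp (List.mem_of_find?_eq_some hf)
          have hpredi : e.1 < i := by simpa using List.find?_some hf
          have hopen : (e.2 == "[") = true := by
            have h1 := (hmem e (by simp [hmm])).1
            have h2 := hall e hmm
            simp [isBr] at h1 h2 ⊢
            tauto
          have hpi : p < e.1 := (List.pairwise_cons.mp hpw).1 e hmm
          simp only [Option.some_or, hopen]
          simp [hine]
          omega
      | none =>
          simp only [Option.none_or]
          by_cases hp : p < i
          · rw [List.find?_cons_of_pos (by simpa using hp)]
            simp [hc, hine]
            omega
          · rw [List.find?_cons_of_neg (by simpa using hp), List.find?_nil]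
            simp
            omega
  | case2 p c rest hc q d tail hdw ih =>
      intro hpw hmem hi
      rw [buildIntervals, if_pos hc, hdw]
      have hrest : rest = rest.takeWhile (fun e => e.2 != "]") ++ (q, d) :: tail := by
        conv_lhs => rw [← List.takeWhile_append_dropWhile (p := fun e => e.2 != "]") (l := rest)]
        rw [hdw]
      have hdcl : (d == "[") = false := by
        have := dropWhile_head_not (fun e => e.2 != "]") rest (q, d) tail hdw
        simp at this
        simp [this]
      have hp_all : ∀ e ∈ rest, p < e.1 := (List.pairwise_cons.mp hpw).1
      have hpw_rest := hpw.of_cons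
      rw [hrest] at hpw_rest
      obtain ⟨hmid_pw, hqt_pw, hcross⟩ := List.pairwise_append.mp hpw_rest
      have hq_tail : ∀ e ∈ tail, q < e.1 := by
        intro e he
        exact (List.pairwise_cons.mp hqt_pw).1 e he
      have htail_mem : ∀ e ∈ tail, e ∈ (p, c) :: rest := by
        intro e he
        rw [hrest]
        simp [he]
      have hmid_mem : ∀ e ∈ rest.takeWhile (fun e => e.2 != "]"), e ∈ (p, c) :: rest := by
        intro e he
        rw [hrest]
        simp [he]
      have hih := ih hqt_pw.of_cons (fun e he => hmem e (htail_mem e he)) hi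
      unfold covB at hih ⊢
      rw [List.any_cons, hih]
      generalize hgen : lob tail i = L
      unfold lob
      rw [show ((p, c) :: rest).reverse
            = tail.reverse ++ ((q, d) :: (((rest.takeWhile (fun e => e.2 != "]")).reverse) ++ [(p, c)])) by
          conv_lhs => rw [hrest]
          simp]
      rw [List.find?_append]
      cases htf : tail.reverse.find? (fun e => decide (e.1 < i)) with
      | some e =>
          have hmm : e ∈ tail := List.mem_reverse.mp (List.mem_of_find?_eq_some htf)
          have hpredi : e.1 < i := by simpa using List.find?_some htf
          have hqe : q < e.1 := hq_tail e hmm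
          have hiq : decide (i ≤ q) = false := by simp; omega
          have hL : L = (e.2 == "[") := by rw [← hgen]; unfold lob; rw [htf]
          simp [hiq, hL]
      | none =>
          have hL : L = false := by rw [← hgen]; unfold lob; rw [htf]
          rw [hL]
          simp only [Option.none_or, Bool.or_false]
          by_cases hqi : q < i
          · rw [List.find?_cons_of_pos (by simpa using hqi)]
            simp [hdcl]
            omega
          · rw [List.find?_cons_of_neg (by simpa using hqi), List.find?_append]
            cases hmf : (rest.takeWhile (fun e => e.2 != "]")).reverse.find? (fun e => decide (e.1 < i)) with
            | some e =>
                have hmm : e ∈ rest.takeWhile (fun e => e.2 != "]") :=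
                  List.mem_reverse.mp (List.mem_of_find?_eq_some hmf)
                have hpredi : e.1 < i := by simpa using List.find?_some hmf
                have hopen : (e.2 == "[") = true := by
                  have h1 := (hmem e (hmid_mem e hmm)).1
                  have h2 := List.mem_takeWhile_imp hmm
                  simp [isBr] at h1 h2 ⊢
                  tauto
                have hpe : p < e.1 := by
                  apply hp_all
                  rw [hrest]
                  simp [hmm]
                simp only [Option.some_or, hopen]
                simp
                omega
            | none =>
                simp only [Option.none_or]
                by_cases hp : p < i
                · rw [List.find?_cons_of_pos (by simpa using hp)]
                  simp [hc]
                  omega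
                · rw [List.find?_cons_of_neg (by simpa using hp), List.find?_nil]
                  simp
                  omega

lemma loop_eq_any (ip_list aba bab : List String) (hb : babOf aba = some bab) :
    ∀ (l : List String) (n : Nat) (ins : Bool), ip_list.drop n = l →
      hasBabLoop ip_list aba n ins =
        (PySem.List.enumerate (marksFrom l ins) (n : Int)).any (fun p =>
          p.2 && (PySem.List.slice ip_list (some p.1) (some (p.1 + 3)) == bab)) := by
  intro l
  induction l with
  | nil =>
      intro n ins hd
      have hlen : ip_list.length ≤ n := by
        simpa [List.drop_eq_nil_iff] using hd
      rw [hasBabLoop]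
      split
      · omega
      · simp [marksFrom]
  | cons c cs ih =>
      intro n ins hd
      have hlt : n < ip_list.length := by
        by_contra hge
        rw [List.drop_eq_nil_iff.mpr (by omega)] at hd
        exact (List.cons_ne_nil c cs) hd.symm
      have hget : ip_list[n] = c := by
        have : (ip_list.drop n)[0]'(by rw [hd]; simp) = c := by simp [hd]
        simpa [List.getElem_drop] using this
      have hd' : ip_list.drop (n + 1) = cs := by
        have h1 : ip_list.drop (n + 1) = (ip_list.drop n).drop 1 := by
          rw [List.drop_drop, Nat.add_comm]
        rw [h1, hd]; rfl
      rw [hasBabLoop]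
      rw [dif_pos hlt]
      simp only [hb, hget]
      have hstep : (if (c == "[") = true then true else if (c == "]") = true then false else ins) = babStep c ins := rfl
      rw [hstep, ih (n + 1) (babStep c ins) hd']
      simp only [marksFrom, PySem.List.enumerate_cons, List.any_cons, babStep]
      have hcast : ((n : Int) + 1) = ((n + 1 : Nat) : Int) := by push_cast; ring
      rw [hcast]
      have hbeq : (bab == PySem.List.slice ip_list (some (n : Int)) (some ((n : Int) + 3)))
        = (PySem.List.slice ip_list (some (n : Int)) (some ((n : Int) + 3)) == bab) :=
        Bool.beq_comm
      cases hcond : ins && (PySem.List.slice ip_list (some (n : Int)) (some ((n : Int) + 3)) == bab) with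
      | true => simp [hbeq, hcond]
      | false => simp [hbeq, hcond]

-- ===== VERDICT (by name: the statement is the Claim_ definition above) =====
theorem has_bab_spec : Claim_equal_has_bab := by
  intro ip_list aba _ hpre
  unfold Spec_has_bab has_bab has_bab_alt
  cases hip : ip_list with
  | nil => rw [hasBabLoop]; simp
  | cons x xs =>
      rw [← hip]
      have hne : ip_list.isEmpty = false := by simp [hip]
      rw [if_neg (by simp [hne])]
      have hlen2 : 2 ≤ aba.length := by
        rcases hpre with h | h
        · rw [h] at hip; cases hip
        · exact h
      obtain ⟨a0, a1, r, rfl⟩ : ∃ a0 a1 r, aba = a0 :: a1 :: r := by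
        match aba, hlen2 with
        | a0 :: a1 :: r, _ => exact ⟨a0, a1, r, rfl⟩
      obtain ⟨bab, hb⟩ : ∃ bab, babOf (a0 :: a1 :: r) = some bab := by
        have h0 : ((0:Int) ≤ (r.length:Int) + 1) := by positivity
        refine ⟨(a1.toList ++ a0.toList ++ a1.toList).map (fun c => String.mk [c]), ?_⟩
        unfold babOf
        rw [show PySem.List.pyGet? (a0 :: a1 :: r) 1 = some a1 from by
              simp [PySem.List.pyGet?, PySem.List.pyIdx?],
            show PySem.List.pyGet? (a0 :: a1 :: r) 0 = some a0 from by
              simp [PySem.List.pyGet?, PySem.List.pyIdx?, h0]]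
      rw [loop_eq_any _ _ bab hb ip_list 0 false (by simp), hb]
      simp only []
      set l := ip_list
      set nI : Int := (l.length : Int) with hnI
      have hB0 : ∀ e ∈ bracketsOfP l, 0 ≤ e.1 ∧ e.1 < nI := by
        intro e he
        have := mem_bracketsOfP l e he
        exact ⟨this.1, by exact_mod_cast this.2.1⟩
      have hBm : ∀ e ∈ bracketsOfP l, isBr e.2 = true ∧ e.1 < nI := by
        intro e he
        have := mem_bracketsOfP l e he
        exact ⟨this.2.2, by exact_mod_cast this.2.1⟩
      rw [Bool.eq_iff_iff]
      simp only [List.any_eq_true]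
      constructor
      · rintro ⟨p, hpmem, hp⟩
        rw [PySem.List.mem_enumerate_iff] at hpmem
        obtain ⟨k, hk, rfl⟩ := hpmem
        rw [marksFrom_length] at hk
        simp only [Bool.and_eq_true, beq_iff_eq] at hp
        obtain ⟨hmk, hwin⟩ := hp
        rw [marksFrom_getElem l false k hk] at hmk
        rw [← lob_bracketsOfP l k (le_of_lt hk)] at hmk
        have hcov : covB (buildIntervals nI (bracketsOfP l)) (k : Int) = true := by
          rw [covB_buildIntervals nI (k : Int) (bracketsOfP l) (pairwise_bracketsOfP l) hBm
            (by rw [hnI]; omega)]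
          exact hmk
        unfold covB at hcov
        rw [List.any_eq_true] at hcov
        obtain ⟨se, hse, hcond⟩ := hcov
        refine ⟨se, hse, ?_⟩
        refine ⟨(k : Int), ?_, ?_⟩
        · rw [PySem.List.mem_pyRange_one]
          simp only [Bool.and_eq_true, decide_eq_true_eq] at hcond
          omega
        · simp only [beq_iff_eq]
          simpa using hwin
      · rintro ⟨se, hse, i, hirange, hwin⟩
        rw [PySem.List.mem_pyRange_one] at hirange
        have hbnd := buildIntervals_bounds nI (bracketsOfP l) hB0 se hse
        have hi0 : 0 ≤ i := by omega
        have hilen : i < nI := by omega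
        obtain ⟨k, rfl⟩ : ∃ k : Nat, i = (k : Int) := ⟨i.toNat, by omega⟩
        have hklen : k < l.length := by rw [hnI] at hilen; exact_mod_cast hilen
        have hcov : covB (buildIntervals nI (bracketsOfP l)) (k : Int) = true := by
          unfold covB
          rw [List.any_eq_true]
          exact ⟨se, hse, by simp only [Bool.and_eq_true, decide_eq_true_eq]; omega⟩
        rw [covB_buildIntervals nI (k : Int) (bracketsOfP l) (pairwise_bracketsOfP l) hBm
          (by rw [hnI]; omega)] at hcov
        rw [lob_bracketsOfP l k (le_of_lt hklen)] at hcov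
        refine ⟨((0 : Int) + (k : Nat), (marksFrom l false)[k]'(by rw [marksFrom_length]; exact hklen)), ?_, ?_⟩
        · rw [PySem.List.mem_enumerate_iff]
          exact ⟨k, by rw [marksFrom_length]; exact hklen, rfl⟩
        · simp only [Bool.and_eq_true, beq_iff_eq]
          constructor
          · rw [marksFrom_getElem l false k hklen]
            exact hcov
          · simpa using (by simpa using hwin : PySem.List.slice l (some (k : Int)) (some ((k : Int) + 3)) = bab)
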